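-- pv_equiv track=rewrite | github.com/kangxie-colorado/leetcode-and-notes | 212.1283.smallestDivisonSum.py | getDivisionSum
-- ===== SOURCE A (Python) =====
-- from bisect import bisect_right
--
-- def getDivisionSum(nums, d):
--     nums.sort()
--     lastMultipleIdx = 0
--     multiple = 1
--     res = 0
--     while d*multiple <= nums[-1]:
--         idx = bisect_right(nums, d*multiple)
--         res += (idx-lastMultipleIdx)*multiple
--         multiple += 1
--         lastMultipleIdx = idx
--     res += (len(nums)-lastMultipleIdx)*multiple
--     return res
-- ===== SOURCE B (Python) =====
-- def getDivisionSum(nums, d):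
--     # One pass, no sort, no bucket loop: A counts each element at the first
--     # multiple m >= 1 with d*m >= x, i.e. the element contributes max(1, ceil(x/d)).
--     # (A sorts nums in place; B leaves nums untouched -- return values agree.)
--     return sum(max(1, (x + d - 1) // d) for x in nums)
-- ===== Notes on version B (the rewrite author's own statement) =====
-- stated objective: simpler
-- what changed: replaced A's sort + per-multiple bisect bucket loop by a single unsorted pass summing each element's contribution max(1, (x+d-1)//d); B does not mutate nums (A sorts it in place), return values agree (measured A/B ratio 1.45x at the largest size, below the 1.5x bar, so no speed claim)
-- outside the precondition, e.g. on getDivisionSum([-10], -5): A returns 1, B returns 3; on getDivisionSum([-3], 0): A returns 1, B raises ZeroDivisionError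
import Mathlib
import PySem

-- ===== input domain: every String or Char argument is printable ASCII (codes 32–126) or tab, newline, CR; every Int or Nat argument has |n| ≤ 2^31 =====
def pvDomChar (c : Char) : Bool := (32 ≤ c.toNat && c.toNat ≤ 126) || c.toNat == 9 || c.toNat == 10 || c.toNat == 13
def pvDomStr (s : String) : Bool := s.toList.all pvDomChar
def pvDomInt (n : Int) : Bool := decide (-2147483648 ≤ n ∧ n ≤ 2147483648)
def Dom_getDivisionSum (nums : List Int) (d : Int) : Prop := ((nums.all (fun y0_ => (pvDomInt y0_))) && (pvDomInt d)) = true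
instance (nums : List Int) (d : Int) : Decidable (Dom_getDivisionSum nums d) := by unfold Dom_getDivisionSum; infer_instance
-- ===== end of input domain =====

-- B replaces A's sort + per-multiple bisect bucket loop by one unsorted pass summing
-- max(1, (x+d-1)//d) per element; A sorts nums in place (B does not) — the equivalence
-- proved here is about the return value.


-- ===== PORT A =====
-- the while loop of A: state (lastMultipleIdx, multiple, res); fuel only bounds the
-- iteration count (for 1 ≤ d the condition d*multiple ≤ last fails within the given fuel)
def loopA (s : List Int) (d last : Int) : Nat → Int → Int → Int → Int
  | 0, lastIdx, multiple, res => res + ((s.length : Int) - lastIdx) * multiple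
  | fuel + 1, lastIdx, multiple, res =>
    if d * multiple ≤ last then
      loopA s d last fuel ((PySem.List.bisectRight s (d * multiple) : Nat) : Int)
        (multiple + 1)
        (res + (((PySem.List.bisectRight s (d * multiple) : Nat) : Int) - lastIdx) * multiple)
    else
      res + ((s.length : Int) - lastIdx) * multiple

def getDivisionSum (nums : List Int) (d : Int) : Int :=
  let s := PySem.List.sorted nums (fun x => x) false   -- nums.sort()
  match PySem.List.pyGet? s (-1) with                  -- nums[-1]; none = IndexError, excluded by Pre_
  | none => 0
  | some last => loopA s d last (last.toNat + 1) 0 1 0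

-- ===== PORT B =====
def getDivisionSum_alt (nums : List Int) (d : Int) : Int :=
  nums.foldl (fun acc x => acc + max 1 (PySem.Int.floordiv (x + d - 1) d)) 0

-- ===== PRECONDITION & SPEC =====
-- Pre_ excludes empty nums (A raises IndexError) and d ≤ 0, outside the function's
-- natural domain (positive divisor): there A's multiple loop diverges whenever some
-- element is ≥ d, and in the remaining loop-skip cases returns len(nums) (d < 0) or
-- len(nums) (d = 0, all elements negative) while B returns the quotient sum / raises.
def Pre_getDivisionSum (nums : List Int) (d : Int) : Prop := nums ≠ [] ∧ 1 ≤ d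
instance (nums : List Int) (d : Int) : Decidable (Pre_getDivisionSum nums d) := by
  unfold Pre_getDivisionSum; infer_instance

def pvWitness_getDivisionSum : List Int × Int := ([3, 1, 7, 7], 2)

def Spec_getDivisionSum (nums : List Int) (d : Int) (out : Int) : Prop := out = getDivisionSum_alt nums d
instance (nums : List Int) (d : Int) (out : Int) : Decidable (Spec_getDivisionSum nums d out) := by unfold Spec_getDivisionSum; infer_instance

-- ===== CLAIM (what is proved, stated in full; the proofs are below) =====
def Claim_equal_getDivisionSum : Prop := ∀ (nums : List Int) (d : Int), Dom_getDivisionSum nums d → Pre_getDivisionSum nums d → Spec_getDivisionSum nums d (getDivisionSum nums d)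

-- ===== LEMMAS AND PROOFS =====

-- per-element contribution
def contrib (d m x : Int) : Int := max m (PySem.Int.floordiv (x + d - 1) d)

lemma contrib_eq_of_le {d m x : Int} (hd : 0 < d) (hx : x ≤ d * m) :
    contrib d m x = m := by
  have : PySem.Int.floordiv (x + d - 1) d < m + 1 :=
    (PySem.Int.floordiv_lt_iff_lt_mul hd).2 (by nlinarith)
  simp [contrib]
  omega

lemma contrib_succ_of_gt {d m x : Int} (hd : 0 < d) (hx : d * m < x) :
    contrib d (m + 1) x = contrib d m x := by
  have : m + 1 ≤ PySem.Int.floordiv (x + d - 1) d :=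
    (PySem.Int.le_floordiv_iff_mul_le hd).2 (by nlinarith)
  simp [contrib]
  omega

lemma sum_contrib_const {d m : Int} (hd : 0 < d) (t : List Int)
    (h : ∀ x ∈ t, x ≤ d * m) :
    (t.map (contrib d m)).sum = m * (t.length : Int) := by
  induction t with
  | nil => simp
  | cons a t ih =>
    have ha := contrib_eq_of_le hd (h a (by simp))
    have := ih (fun x hx => h x (by simp [hx]))
    simp [ha, this]
    ring

lemma loopA_inv (d last : Int) (hd : 1 ≤ d) (s : List Int)
    (hs : s.Pairwise (· ≤ ·)) (hlast : ∀ x ∈ s, x ≤ last) :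
    ∀ (fuel : Nat) (j : Nat) (m res : Int), 1 ≤ m → j ≤ s.length →
    (∀ i (hi : i < s.length), i < j → s[i] ≤ d * (m - 1)) →
    last < d * (m + fuel) →
    loopA s d last fuel (j : Int) m res
      = res + ((s.drop j).map (contrib d m)).sum := by
  have hclose : ∀ (j : Nat) (m res : Int), j ≤ s.length → last < d * m →
      res + ((s.length : Int) - (j : Int)) * m
        = res + ((s.drop j).map (contrib d m)).sum := by
    intro j m res hj hlt
    have hb : ∀ x ∈ s.drop j, x ≤ d * m := fun x hx =>
      le_of_lt (lt_of_le_of_lt (hlast x (List.mem_of_mem_drop hx)) hlt)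
    rw [sum_contrib_const (by omega) _ hb, List.length_drop]
    have : ((s.length - j : Nat) : Int) = (s.length : Int) - (j : Int) := by omega
    rw [this]; ring
  intro fuel
  induction fuel with
  | zero =>
    intro j m res _ hj hjle hfuel
    simp only [loopA]
    have h0 : d * (m + ((0 : Nat) : Int)) = d * m := by norm_num
    exact hclose j m res hj (by omega)
  | succ fuel ih =>
    intro j m res hm hj hjle hfuel
    simp only [loopA]
    by_cases hcond : d * m ≤ last
    · rw [if_pos hcond]
      obtain ⟨hblen, hlo, hhi⟩ := PySem.List.bisectRight_spec s (d * m) hs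
      set b := PySem.List.bisectRight s (d * m) with hbdef
      have hdm : d * (m - 1) ≤ d * m := by nlinarith
      have hjb : j ≤ b := by
        by_contra h
        have h : b < j := by omega
        have h1 : s[b]'(by omega) ≤ d * (m - 1) := hjle b (by omega) h
        have h2 : d * m < s[b]'(by omega) := hhi b (by omega) (le_refl _)
        omega
      have hrec := ih b (m + 1) (res + ((b : Int) - (j : Int)) * m) (by omega) hblen
        (by intro i hi hib
            have := hlo i hi hib
            simpa using this)
        (by have : m + 1 + (fuel : Int) = m + (fuel + 1 : Nat) := by omega
            rw [this]; exact hfuel)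
      rw [hrec]
      -- rewrite the (m+1)-sum over the tail drop b into the m-sum
      have htail : ((s.drop b).map (contrib d (m + 1))).sum
          = ((s.drop b).map (contrib d m)).sum := by
        have : ∀ x ∈ s.drop b, contrib d (m + 1) x = contrib d m x := by
          intro x hx
          obtain ⟨i, hi, hix⟩ := List.mem_iff_getElem.mp hx
          have hgt : d * m < x := by
            rw [← hix, List.getElem_drop]
            have hi' : i < s.length - b := by simpa [List.length_drop] using hi
            exact hhi (b + i) (by omega) (by omega)
          exact contrib_succ_of_gt (by omega) hgt
        rw [List.map_congr_left this]
      rw [htail]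
      -- split drop j = take (b-j) ++ drop b
      have hsplit : s.drop j = (s.drop j).take (b - j) ++ s.drop b := by
        conv_lhs => rw [← List.take_append_drop (b - j) (s.drop j)]
        rw [List.drop_drop]
        have : j + (b - j) = b := by omega
        rw [this]
      rw [hsplit, List.map_append, List.sum_append]
      have hmid : (((s.drop j).take (b - j)).map (contrib d m)).sum
          = m * ((b : Int) - (j : Int)) := by
        have hbnd : ∀ x ∈ (s.drop j).take (b - j), x ≤ d * m := by
          intro x hx
          obtain ⟨i, hi, hix⟩ := List.mem_iff_getElem.mp hx
          have hilt : i < b - j := by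
            have := hi
            simp [List.length_take, List.length_drop] at this
            omega
          have : x = s[j + i]'(by omega) := by
            rw [← hix, List.getElem_take, List.getElem_drop]
          rw [this]
          exact hlo (j + i) (by omega) (by omega)
        rw [sum_contrib_const (by omega) _ hbnd]
        have : (((s.drop j).take (b - j)).length : Int) = (b : Int) - (j : Int) := by
          simp [List.length_take, List.length_drop]
          omega
        rw [this]
      rw [hmid]
      ring
    · rw [if_neg hcond]
      exact hclose j m res hj (by omega)

-- ===== VERDICT (by name: the statement is the Claim_ definition above) =====
theorem getDivisionSum_spec : Claim_equal_getDivisionSum := by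
  intro nums d _ hpre
  obtain ⟨hne, hd⟩ := hpre
  unfold Spec_getDivisionSum getDivisionSum getDivisionSum_alt
  have hsne : PySem.List.sorted nums (fun x => x) false ≠ [] := by
    simpa [PySem.List.sorted_eq_nil_iff] using hne
  set s := PySem.List.sorted nums (fun x => x) false with hsdef
  have hpair : s.Pairwise (· ≤ ·) := by
    simpa using PySem.List.sorted_pairwise nums (fun x => x)
  show (match PySem.List.pyGet? s (-1) with
        | none => 0
        | some last => loopA s d last (last.toNat + 1) 0 1 0) = _
  rw [PySem.List.pyGet?_neg_one, List.getLast?_eq_some_getLast hsne]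
  set last := s.getLast hsne with hldef
  have hmax : ∀ x ∈ s, x ≤ last := by
    intro x hx
    obtain ⟨i, hi, hix⟩ := List.mem_iff_getElem.mp hx
    have hl : last = s[s.length - 1] := by rw [hldef, List.getLast_eq_getElem]
    have hmono := PySem.List.sorted_id_getElem_mono nums
      (p := i) (q := s.length - 1) (by omega) (by rw [← hsdef]; omega)
    rw [hl, ← hix]
    simpa [← hsdef] using hmono
  have hbound : last < d * (1 + ((last.toNat + 1 : Nat) : Int)) := by
    have h1 := Int.self_le_toNat last
    have h2 : (1 : Int) + ((last.toNat + 1 : Nat) : Int) = (last.toNat : Int) + 2 := by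
      push_cast; ring
    nlinarith
  have hinv := loopA_inv d last hd s hpair hmax (last.toNat + 1) 0 1 0 (le_refl 1)
    (by omega) (by omega) hbound
  simp only [Nat.cast_zero, List.drop_zero, zero_add] at hinv
  show loopA s d last (last.toNat + 1) 0 1 0 = _
  rw [hinv]
  have hB := PySem.List.foldl_add nums (fun x => max 1 (PySem.Int.floordiv (x + d - 1) d)) 0
  rw [hB, zero_add]
  exact ((PySem.List.sorted_perm nums (fun x => x) false).map (contrib d 1)).sum_eq
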